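-- pv_equiv track=rewrite | github.com/RossWorks/FiscalCode | FiscalCode.py | GetSurame
-- ===== SOURCE A (Python) =====
-- def GetSurame(Name: str):
-- 	Name=Name.upper()
-- 	vowels=('A','E','I','O','U')
-- 	Letters=0
-- 	outString=""
-- 	if (len(Name)<3):
-- 		outString=Name.ljust(3,'X')
-- 		return outString
-- 	for i in Name:
-- 		if (i==' '):
-- 			continue
-- 		for j in vowels:
-- 			if (i==j):
-- 				break
-- 		if (i==j):
-- 			continue
-- 		outString+=i
-- 		Letters+=1
-- 		if (Letters==3):
-- 			return outString
-- 	for i in Name: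
-- 		for j in vowels:
-- 			if (i==j):
-- 				outString+=i
-- 				Letters+=1
-- 				if (Letters==3):
-- 					return outString
-- 	return outString
-- ===== SOURCE B (Python) =====
-- def GetSurame(Name: str):
--     Name = Name.upper()
--     if len(Name) < 3:
--         return Name.ljust(3, 'X')
--     cons, vows = [], []
--     for ch in Name:
--         if ch == ' ':
--             continue
--         (vows if ch in 'AEIOU' else cons).append(ch)
--     return ''.join(cons + vows)[:3]
-- ===== Notes on version B (the rewrite author's own statement) =====
-- stated objective: simpler
-- what changed: A's two sequential scans (consonants with a leftover-loop-variable vowel test and a running counter with early returns, then a vowel scan) are replaced by one bucketing pass into cons/vows lists followed by joining cons + vows and slicing to the first 3 characters.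
import Mathlib
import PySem

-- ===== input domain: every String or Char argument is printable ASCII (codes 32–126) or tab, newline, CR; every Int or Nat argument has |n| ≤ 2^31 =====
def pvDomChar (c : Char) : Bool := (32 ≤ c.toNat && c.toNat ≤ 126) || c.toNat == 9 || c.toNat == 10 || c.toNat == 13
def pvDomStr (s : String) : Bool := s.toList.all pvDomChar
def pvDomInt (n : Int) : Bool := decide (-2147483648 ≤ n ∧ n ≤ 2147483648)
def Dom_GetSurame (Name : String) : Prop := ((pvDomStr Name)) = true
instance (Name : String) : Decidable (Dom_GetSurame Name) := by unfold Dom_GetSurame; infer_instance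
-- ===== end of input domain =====

-- B replaces A's two sequential scans with early returns by one bucketing pass plus a take-3 slice (objective: simpler).

-- ===== PORT A =====
-- strings handled as List Char (exact); vowel tuple as its literal list
def pvVowels : List Char := ['A', 'E', 'I', 'O', 'U']

-- 'for j in vowels: if i==j: break' — j keeps the value it had when the loop ended
def pvVloop (i : Char) : List Char → Char
  | [] => 'U'          -- unreachable for the nonempty vowel tuple
  | [j] => j
  | j :: rest => if i == j then j else pvVloop i rest

-- first loop of A: collect consonants, early return (.inl) at 3 letters
def pvLoop1 : List Char → List Char → Nat → Sum (List Char) (List Char × Nat)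
  | [], out, letters => .inr (out, letters)
  | i :: rest, out, letters =>
    if i == ' ' then pvLoop1 rest out letters
    else
      let j := pvVloop i pvVowels
      if i == j then pvLoop1 rest out letters
      else
        let out' := out ++ [i]
        let letters' := letters + 1
        if letters' == 3 then .inl out' else pvLoop1 rest out' letters'

-- inner 'for j in vowels' loop of A's second loop (no break: runs over all vowels)
def pvInner (i : Char) : List Char → List Char → Nat → Sum (List Char) (List Char × Nat)
  | [], out, letters => .inr (out, letters)
  | j :: rest, out, letters =>
    if i == j then
      let out' := out ++ [i]
      let letters' := letters + 1
      if letters' == 3 then .inl out' else pvInner i rest out' letters'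
    else pvInner i rest out letters

-- second loop of A: collect vowels, early return at 3 letters
def pvLoop2 : List Char → List Char → Nat → List Char
  | [], out, _ => out
  | i :: rest, out, letters =>
    match pvInner i pvVowels out letters with
    | .inl s => s
    | .inr (out', letters') => pvLoop2 rest out' letters'

def GetSurame (Name : String) : String :=
  let N := (PySem.Str.upper Name).toList
  if N.length < 3 then
    String.ofList (N ++ List.replicate (3 - N.length) 'X')  -- Name.ljust(3,'X'), exact
  else
    match pvLoop1 N [] 0 with
    | .inl s => String.ofList s
    | .inr (out, letters) => String.ofList (pvLoop2 N out letters)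

-- ===== PORT B =====
-- single bucketing pass of Source B: spaces skipped, vowels and consonants into two lists
def pvBucket : List Char → List Char → List Char → List Char × List Char
  | [], cons, vows => (cons, vows)
  | ch :: rest, cons, vows =>
    if ch == ' ' then pvBucket rest cons vows
    else if ['A', 'E', 'I', 'O', 'U'].contains ch then pvBucket rest cons (vows ++ [ch])
    else pvBucket rest (cons ++ [ch]) vows

def GetSurame_alt (Name : String) : String :=
  let N := (PySem.Str.upper Name).toList
  if N.length < 3 then
    String.ofList (N ++ List.replicate (3 - N.length) 'X')  -- Name.ljust(3,'X'), exact
  else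
    let p := pvBucket N [] []
    String.ofList ((p.1 ++ p.2).take 3)       -- ''.join(cons + vows)[:3]

-- ===== PRECONDITION & SPEC =====
def Spec_GetSurame (Name : String) (out : String) : Prop := out = GetSurame_alt Name
instance (Name : String) (out : String) : Decidable (Spec_GetSurame Name out) := by unfold Spec_GetSurame; infer_instance

-- ===== CLAIM (what is proved, stated in full; the proofs are below) =====
def Claim_equal_GetSurame : Prop := ∀ (Name : String), Dom_GetSurame Name → Spec_GetSurame Name (GetSurame Name)

-- ===== LEMMAS AND PROOFS =====

def pvIsVowel (c : Char) : Bool := ['A', 'E', 'I', 'O', 'U'].contains c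
def pvIsCons (c : Char) : Bool := !(c == ' ') && !pvIsVowel c

lemma pvVloop_eq (i : Char) : (i == pvVloop i pvVowels) = pvIsVowel i := by
  by_cases hA : i = 'A'
  · subst hA; decide
  by_cases hE : i = 'E'
  · subst hE; decide
  by_cases hI : i = 'I'
  · subst hI; decide
  by_cases hO : i = 'O'
  · subst hO; decide
  by_cases hU : i = 'U'
  · subst hU; decide
  simp [pvVloop, pvVowels, pvIsVowel, beq_eq_false_iff_ne.mpr hA, beq_eq_false_iff_ne.mpr hE,
    beq_eq_false_iff_ne.mpr hI, beq_eq_false_iff_ne.mpr hO, beq_eq_false_iff_ne.mpr hU]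
  exact ⟨hA, hE, hI, hO, hU⟩

lemma pvBucket_spec (cs cons vows : List Char) :
    pvBucket cs cons vows = (cons ++ cs.filter pvIsCons, vows ++ cs.filter pvIsVowel) := by
  induction cs generalizing cons vows with
  | nil => simp [pvBucket]
  | cons ch rest ih =>
    simp only [pvBucket]
    rw [show (['A','E','I','O','U'].contains ch) = pvIsVowel ch from rfl]
    by_cases hs : ch = ' '
    · subst hs
      have hc : pvIsCons ' ' = false ∧ pvIsVowel ' ' = false := by decide
      simp [ih, hc.1, hc.2]
    · cases hv : pvIsVowel ch
      · have hc : pvIsCons ch = true := by simp [pvIsCons, hs, hv]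
        simp [hs, hv, hc, ih]
      · have hc : pvIsCons ch = false := by simp [pvIsCons, hv]
        simp [hs, hv, hc, ih, List.filter_cons]

lemma pvLoop1_spec (cs : List Char) : ∀ (out : List Char), out.length < 3 →
    pvLoop1 cs out out.length =
      if 3 ≤ (out ++ cs.filter pvIsCons).length then
        .inl ((out ++ cs.filter pvIsCons).take 3)
      else .inr (out ++ cs.filter pvIsCons, (out ++ cs.filter pvIsCons).length) := by
  induction cs with
  | nil =>
    intro out h
    simp only [pvLoop1, List.filter_nil, List.append_nil]
    rw [if_neg (by omega)]
  | cons i rest ih =>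
    intro out h
    simp only [pvLoop1, pvVloop_eq]
    by_cases hs : i = ' '
    · simp [hs, ih out h, List.filter_cons, pvIsCons]
    · by_cases hv : pvIsVowel i = true
      · simp [hs, hv, ih out h, List.filter_cons, pvIsCons]
      · have hc : pvIsCons i = true := by simp [pvIsCons, hs, hv]
        simp only [hs, hv, List.filter_cons, hc, if_true, if_false, beq_iff_eq, if_neg hs,
          Bool.false_eq_true]
        by_cases h3 : out.length + 1 = 3
        · have hlen : (out ++ [i]).length = 3 := by simp [h3]
          have htake : ((out ++ [i]) ++ rest.filter pvIsCons).take 3 = out ++ [i] := by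
            rw [← hlen, List.take_left]
          simp only [List.append_assoc, List.singleton_append] at htake
          simp [h3, htake]
          omega
        · have h' : (out ++ [i]).length < 3 := by simp; omega
          have := ih (out ++ [i]) h'
          simp only [List.length_append, List.length_cons, List.length_nil,
            List.append_assoc, List.singleton_append] at this ⊢
          simpa [h3, Nat.add_comm, Nat.add_left_comm, Nat.add_assoc] using this

lemma pvInner_spec (i : Char) (out : List Char) (h : out.length < 3) :
    pvInner i pvVowels out out.length =
      if pvIsVowel i then
        (if out.length + 1 = 3 then .inl (out ++ [i]) else .inr (out ++ [i], out.length + 1))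
      else .inr (out, out.length) := by
  simp only [pvVowels, pvInner, pvIsVowel, List.contains_cons]
  by_cases hA : i = 'A' <;> by_cases hE : i = 'E' <;> by_cases hI : i = 'I' <;>
    by_cases hO : i = 'O' <;> by_cases hU : i = 'U' <;>
    simp_all [pvInner]

lemma pvLoop2_spec (cs : List Char) : ∀ (out : List Char), out.length < 3 →
    pvLoop2 cs out out.length = (out ++ cs.filter pvIsVowel).take 3 := by
  induction cs with
  | nil =>
    intro out h
    simp [pvLoop2, List.take_of_length_le (le_of_lt h)]
  | cons i rest ih =>
    intro out h
    simp only [pvLoop2, pvInner_spec i out h]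
    by_cases hv : pvIsVowel i = true
    · by_cases h3 : out.length + 1 = 3
      · have hlen : (out ++ [i]).length = 3 := by simp [h3]
        have htake : ((out ++ [i]) ++ rest.filter pvIsVowel).take 3 = out ++ [i] := by
          rw [← hlen, List.take_left]
        simp only [List.append_assoc, List.singleton_append] at htake
        simp [hv, h3, List.filter_cons, htake]
      · have h' : (out ++ [i]).length < 3 := by simp; omega
        have := ih (out ++ [i]) h'
        simp only [List.length_append, List.length_cons, List.length_nil,
          List.append_assoc, List.singleton_append] at this
        simp [hv, h3, List.filter_cons, this]
    · simp [hv, ih out h, List.filter_cons]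

-- ===== VERDICT (by name: the statement is the Claim_ definition above) =====
theorem GetSurame_spec : Claim_equal_GetSurame := by
  intro Name _
  unfold Spec_GetSurame GetSurame GetSurame_alt
  set N := (PySem.Str.upper Name).toList with hN
  by_cases hlen : N.length < 3
  · simp [hlen]
  · simp only [hlen, if_false, pvBucket_spec, List.nil_append]
    have h0 : ([] : List Char).length < 3 := by simp
    have h1 := pvLoop1_spec N [] h0
    simp only [List.nil_append, List.length_nil] at h1
    rw [h1]
    by_cases h3 : 3 ≤ (N.filter pvIsCons).length
    · have : ((N.filter pvIsCons) ++ (N.filter pvIsVowel)).take 3 =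
          (N.filter pvIsCons).take 3 := by
        rw [List.take_append, List.take_eq_take_min]
        simp [Nat.sub_eq_zero_of_le h3]
      simp [h3, this]
    · have hlt : (N.filter pvIsCons).length < 3 := by omega
      simp [h3, pvLoop2_spec N _ hlt]
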